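-- pv_equiv track=rewrite | github.com/scieloorg/PC-Programs | src/scielo/bin/xml/modules/sgml2xml.py | fix_href
-- ===== SOURCE A (Python) =====
-- def fix_href(content, xml_name, new_href_list):
--     content = content.replace('<graphic href="?' + xml_name + '"', '-FIXHREF-' + 'FIXHREF<graphic href="?' + xml_name + '"-FIXHREF-')
--     items = content.split('-FIXHREF-')
--     new = ''
--     i = 0
--     for item in items:
--         if item.startswith('FIXHREF'):
--             new += '<graphic href="' + new_href_list[i] + '"'
--             i += 1
--         else:
--             new += item
--     return new
-- ===== SOURCE B (Python) =====
-- def fix_href(content, xml_name, new_href_list):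
--     target = '<graphic href="?' + xml_name + '"'
--     parts = content.split(target)
--     pieces = [parts[0]]
--     for i, part in enumerate(parts[1:]):
--         pieces.append('<graphic href="' + new_href_list[i] + '"')
--         pieces.append(part)
--     return ''.join(pieces)
-- ===== Notes on version B (the rewrite author's own statement) =====
-- stated objective: simpler
-- what changed: B drops A's sentinel-marking trick (replace target by '-FIXHREF-'-delimited markers, split on the sentinel, re-scan items for the 'FIXHREF' prefix with a counter): it splits content directly on the literal target and rebuilds by interleaving the successive new hrefs between the split parts.
-- outside the precondition, e.g. on fix_href('FIXHREFx', 'q', ['a']): A returns '<graphic href="a"', B returns 'FIXHREFx'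
import Mathlib
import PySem

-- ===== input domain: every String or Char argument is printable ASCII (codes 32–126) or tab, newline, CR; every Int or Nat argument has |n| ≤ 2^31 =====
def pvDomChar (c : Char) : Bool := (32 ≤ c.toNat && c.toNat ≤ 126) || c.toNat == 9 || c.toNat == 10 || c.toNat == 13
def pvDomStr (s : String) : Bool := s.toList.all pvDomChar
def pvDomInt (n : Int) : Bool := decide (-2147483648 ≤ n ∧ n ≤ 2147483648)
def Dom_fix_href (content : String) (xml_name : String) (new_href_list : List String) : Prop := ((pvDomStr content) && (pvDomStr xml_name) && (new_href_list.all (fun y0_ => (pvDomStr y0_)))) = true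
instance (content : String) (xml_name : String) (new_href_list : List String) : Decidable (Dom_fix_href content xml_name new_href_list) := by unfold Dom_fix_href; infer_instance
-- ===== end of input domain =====

-- B replaces A's sentinel-marking trick (mark each target with '-FIXHREF-' delimiters, split on the
-- sentinel, re-scan items for the 'FIXHREF' prefix with a counter) by a direct split on the literal
-- target followed by interleaved rebuilding: simpler, no sentinel.

-- shared literal pieces of both Pythons
def pvFx : List Char := "FIXHREF".toList
def pvSep : List Char := "-FIXHREF-".toList
def pvTgt (xs : List Char) : List Char := "<graphic href=\"?".toList ++ xs ++ ['"']
-- '<graphic href="' ++ new_href_list[i] ++ '"'  (Python raises IndexError out of range; Pre_ excludes)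
def pvG (lst : List String) (i : Int) : List Char :=
  "<graphic href=\"".toList ++ (PySem.List.pyGetD lst i "").toList ++ ['"']

-- ===== PORT A =====
def fix_href (content : String) (xml_name : String) (new_href_list : List String) : String :=
  let tgt := pvTgt xml_name.toList
  -- content = content.replace(T, '-FIXHREF-' + 'FIXHREF' + T + '-FIXHREF-')
  let c2 := PySem.Chars.replace content.toList tgt (pvSep ++ pvFx ++ tgt ++ pvSep)
  -- items = content.split('-FIXHREF-')
  let items := PySem.Chars.splitOn c2 pvSep
  -- new = ''; i = 0; for item in items: ...
  let st := items.foldl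
    (fun (st : List Char × Int) item =>
      if PySem.Chars.startswith item pvFx then (st.1 ++ pvG new_href_list st.2, st.2 + 1)
      else (st.1 ++ item, st.2)) ([], 0)
  String.ofList st.1

-- ===== PORT B =====
def fix_href_alt (content : String) (xml_name : String) (new_href_list : List String) : String :=
  let tgt := pvTgt xml_name.toList
  -- parts = content.split(target)
  match PySem.Chars.splitOn content.toList tgt with
  | [] => ""   -- unreachable: str.split never returns an empty list
  | p :: rest =>
    -- pieces = [parts[0]]; for i, part in enumerate(parts[1:]): pieces.append(...); pieces.append(part)
    let pieces := (PySem.List.enumerate rest 0).foldl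
      (fun acc ip => acc ++ [pvG new_href_list ip.1] ++ [ip.2]) [p]
    -- return ''.join(pieces)
    String.ofList (PySem.Chars.join [] pieces)

-- ===== PRECONDITION & SPEC =====
-- Pre_ excludes (a) inputs where the target occurs more often than new_href_list has entries, on
-- which A (and B) raises IndexError, and (b) contents containing the substring 'FIXHREF', which
-- collides with A's internal sentinel so that A's raise-or-return behaviour there is an accident of
-- the marking trick.
def Pre_fix_href (content : String) (xml_name : String) (new_href_list : List String) : Prop :=
  PySem.Chars.isIn pvFx content.toList = false ∧
  PySem.Chars.count content.toList (pvTgt xml_name.toList) ≤ new_href_list.length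
instance (content : String) (xml_name : String) (new_href_list : List String) : Decidable (Pre_fix_href content xml_name new_href_list) := by unfold Pre_fix_href; infer_instance

def pvWitness_fix_href : String × String × List String :=
  ("<p>x</p><graphic href=\"?f1.sgm\"/> tail", "f1.sgm", ["img1.jpg"])

def Spec_fix_href (content : String) (xml_name : String) (new_href_list : List String) (out : String) : Prop := out = fix_href_alt content xml_name new_href_list
instance (content : String) (xml_name : String) (new_href_list : List String) (out : String) : Decidable (Spec_fix_href content xml_name new_href_list out) := by unfold Spec_fix_href; infer_instance

-- ===== CLAIM (what is proved, stated in full; the proofs are below) =====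
def Claim_equal_fix_href : Prop := ∀ (content : String) (xml_name : String) (new_href_list : List String), Dom_fix_href content xml_name new_href_list → Pre_fix_href content xml_name new_href_list → Spec_fix_href content xml_name new_href_list (fix_href content xml_name new_href_list)

-- ===== LEMMAS AND PROOFS =====

-- structural recursions equal to PySem's fuel-based scans (for a nonempty pattern)
def scanRep (old new : List Char) : List Char → List Char
  | [] => []
  | c :: t =>
    if old ≠ [] ∧ old.isPrefixOf (c :: t)
    then new ++ scanRep old new (List.drop (old.length - 1) t)
    else c :: scanRep old new t
termination_by l => l.length
decreasing_by
  · simp only [List.length_cons]; exact Nat.lt_succ_of_le (by simp)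
  · simp

def scanSplit (sep : List Char) : List Char → List (List Char)
  | [] => [[]]
  | c :: t =>
    if sep ≠ [] ∧ sep.isPrefixOf (c :: t)
    then [] :: scanSplit sep (List.drop (sep.length - 1) t)
    else match scanSplit sep t with
         | [] => [[c]]
         | p :: ps => (c :: p) :: ps
termination_by l => l.length
decreasing_by
  · simp only [List.length_cons]; exact Nat.lt_succ_of_le (by simp)
  · simp

def consHead (x : List Char) : List (List Char) → List (List Char)
  | [] => [x]
  | p :: ps => (x ++ p) :: ps

lemma scanSplit_ne_nil (sep l) : scanSplit sep l ≠ [] := by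
  cases l with
  | nil => simp [scanSplit]
  | cons c t =>
    rw [scanSplit]
    split
    · simp
    · cases hx : scanSplit sep t <;> simp

lemma scanSplit_no_occ (sep l : List Char) (h : ¬ sep <:+: l) :
    scanSplit sep l = [l] := by
  induction l with
  | nil => simp [scanSplit]
  | cons c t ih =>
    rw [scanSplit]
    rw [if_neg, ih]
    · exact fun hx => h (List.infix_cons hx)
    · rintro ⟨-, hp⟩
      exact h ((List.isPrefixOf_iff_prefix.mp hp).isInfix)

lemma scanRep_no_occ (old new l : List Char) (h : ¬ old <:+: l) :
    scanRep old new l = l := by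
  induction l with
  | nil => simp [scanRep]
  | cons c t ih =>
    rw [scanRep, if_neg, ih]
    · exact fun hx => h (List.infix_cons hx)
    · rintro ⟨-, hp⟩
      exact h ((List.isPrefixOf_iff_prefix.mp hp).isInfix)

lemma scanSplit_boundary (sep : List Char) (hsep : sep ≠ []) :
    ∀ u v, (∀ i < u.length, ¬ sep <+: (u ++ sep ++ v).drop i) →
      scanSplit sep (u ++ sep ++ v) = u :: scanSplit sep v := by
  intro u
  induction u with
  | nil =>
    intro v _
    obtain ⟨c, sep', rfl⟩ : ∃ c s', sep = c :: s' := by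
      cases sep with | nil => exact absurd rfl hsep | cons a b => exact ⟨a, b, rfl⟩
    simp only [List.nil_append, List.cons_append]
    rw [scanSplit, if_pos]
    · congr 1
      congr 1
      simp
    · exact ⟨hsep, List.isPrefixOf_iff_prefix.mpr (by simp [List.prefix_append])⟩
  | cons c u' ih =>
    intro v h
    simp only [List.cons_append]
    rw [scanSplit, if_neg]
    · rw [ih v (fun i hi => by
        have := h (i + 1) (by simpa using Nat.succ_lt_succ hi)
        simpa using this)]
    · rintro ⟨-, hp⟩
      exact h 0 (by simp) (by simpa using List.isPrefixOf_iff_prefix.mp hp)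

lemma scanRep_boundary (old new : List Char) (hold : old ≠ []) :
    ∀ u v, (∀ i < u.length, ¬ old <+: (u ++ old ++ v).drop i) →
      scanRep old new (u ++ old ++ v) = u ++ new ++ scanRep old new v := by
  intro u
  induction u with
  | nil =>
    intro v _
    obtain ⟨c, old', rfl⟩ : ∃ c s', old = c :: s' := by
      cases old with | nil => exact absurd rfl hold | cons a b => exact ⟨a, b, rfl⟩
    simp only [List.nil_append, List.cons_append]
    rw [scanRep, if_pos]
    · congr 2
      simp
    · exact ⟨hold, List.isPrefixOf_iff_prefix.mpr (by simp [List.prefix_append])⟩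
  | cons c u' ih =>
    intro v h
    simp only [List.cons_append]
    rw [scanRep, if_neg]
    · rw [ih v (fun i hi => by
        have := h (i + 1) (by simpa using Nat.succ_lt_succ hi)
        simpa using this)]
    · rintro ⟨-, hp⟩
      exact h 0 (by simp) (by simpa using List.isPrefixOf_iff_prefix.mp hp)

lemma replace_go_eq (old new : List Char) (hold : old ≠ []) :
    ∀ fuel l acc, l.length ≤ fuel →
      PySem.Chars.replace.go old new fuel l acc = acc.reverse ++ scanRep old new l := by
  intro fuel
  induction fuel with
  | zero =>
    intro l acc hl
    have : l = [] := List.length_eq_zero_iff.mp (Nat.le_zero.mp hl)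
    subst this
    simp [PySem.Chars.replace.go, scanRep]
  | succ fuel ih =>
    intro l acc hl
    cases l with
    | nil => simp [PySem.Chars.replace.go, scanRep]
    | cons c t =>
      rw [PySem.Chars.replace.go]
      by_cases hp : old.isPrefixOf (c :: t)
      · rw [if_pos hp]
        have hdrop : List.drop old.length (c :: t) = List.drop (old.length - 1) t := by
          obtain ⟨a, b, rfl⟩ : ∃ a b, old = a :: b := by
            cases old with | nil => exact absurd rfl hold | cons a b => exact ⟨a, b, rfl⟩
          simp
        rw [ih _ _ (by
          have h1 : 1 ≤ old.length := List.length_pos_iff.mpr hold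
          simp only [List.length_drop, List.length_cons] at *
          omega)]
        rw [scanRep, if_pos ⟨hold, hp⟩, hdrop]
        simp
      · rw [if_neg hp, ih _ _ (Nat.le_of_succ_le_succ hl)]
        rw [scanRep, if_neg (fun hx => hp hx.2)]
        simp

lemma replace_eq (s old new : List Char) (hold : old ≠ []) :
    PySem.Chars.replace s old new = scanRep old new s := by
  rw [PySem.Chars.replace, if_neg (by simpa using hold)]
  simpa using replace_go_eq old new hold s.length s [] le_rfl

lemma splitOn_go_eq (sep : List Char) (hsep : sep ≠ []) :
    ∀ fuel l cur acc, l.length ≤ fuel →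
      PySem.Chars.splitOn.go sep fuel l cur acc
        = acc.reverse ++ consHead cur.reverse (scanSplit sep l) := by
  intro fuel
  induction fuel with
  | zero =>
    intro l cur acc hl
    have : l = [] := List.length_eq_zero_iff.mp (Nat.le_zero.mp hl)
    subst this
    simp [PySem.Chars.splitOn.go, scanSplit, consHead]
  | succ fuel ih =>
    intro l cur acc hl
    cases l with
    | nil => simp [PySem.Chars.splitOn.go, scanSplit, consHead]
    | cons c t =>
      rw [PySem.Chars.splitOn.go]
      by_cases hp : sep.isPrefixOf (c :: t)
      · rw [if_pos hp]
        have hdrop : List.drop sep.length (c :: t) = List.drop (sep.length - 1) t := by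
          obtain ⟨a, b, rfl⟩ : ∃ a b, sep = a :: b := by
            cases sep with | nil => exact absurd rfl hsep | cons a b => exact ⟨a, b, rfl⟩
          simp
        rw [ih _ _ _ (by
          have h1 : 1 ≤ sep.length := List.length_pos_iff.mpr hsep
          simp only [List.length_drop, List.length_cons] at *
          omega)]
        rw [scanSplit, if_pos ⟨hsep, hp⟩, hdrop]
        cases hx : scanSplit sep (List.drop (sep.length - 1) t) with
        | nil => exact absurd hx (scanSplit_ne_nil _ _)
        | cons p ps => simp [consHead]
      · rw [if_neg hp, ih _ _ _ (Nat.le_of_succ_le_succ hl)]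
        rw [scanSplit, if_neg (fun hx => hp hx.2)]
        cases hx : scanSplit sep t with
        | nil => exact absurd hx (scanSplit_ne_nil _ _)
        | cons p ps => simp [consHead]

lemma splitOn_eq (s sep : List Char) (hsep : sep ≠ []) :
    PySem.Chars.splitOn s sep = scanSplit sep s := by
  rw [PySem.Chars.splitOn, splitOn_go_eq sep hsep _ _ _ _ (by simp)]
  cases hx : scanSplit sep s with
  | nil => exact absurd hx (scanSplit_ne_nil _ _)
  | cons p ps => simp [consHead]

lemma occ_of_suffix_form (sep u v : List Char)
    (h : ∀ b, b ≠ [] → b <:+ u → ¬ sep <+: b ++ sep ++ v) :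
    ∀ i < u.length, ¬ sep <+: (u ++ sep ++ v).drop i := by
  intro i hi hpre
  have hd : (u ++ sep ++ v).drop i = u.drop i ++ sep ++ v := by
    rw [List.append_assoc, List.drop_append_of_le_length (Nat.le_of_lt hi), ← List.append_assoc]
  rw [hd] at hpre
  exact h (u.drop i) (by simp; omega) (List.drop_suffix i u) hpre

-- no pvSep-occurrence can start inside a FIXHREF-free block
lemma h1 (u v : List Char) (hu : ¬ pvFx <:+: u) :
    ∀ b, b ≠ [] → b <:+ u → ¬ pvSep <+: b ++ pvSep ++ v := by
  intro b hb hsuf hpre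
  rw [List.append_assoc] at hpre
  by_cases hlen : pvSep.length ≤ b.length
  · have hsp : pvSep <+: b := (List.isPrefix_append_of_length hlen).mp hpre
    exact hu (((by decide : pvFx <:+: pvSep).trans hsp.isInfix).trans hsuf.isInfix)
  · have hble : b.length ≤ pvSep.length := Nat.le_of_lt (Nat.lt_of_not_le hlen)
    have hbp : b <+: pvSep :=
      List.prefix_of_prefix_length_le (List.prefix_append b _) hpre hble
    have hbtake : b = pvSep.take b.length := List.prefix_iff_eq_take.mp hbp
    have hr : pvSep.drop b.length <+: pvSep ++ v := by
      have hsplit : pvSep = b ++ pvSep.drop b.length := by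
        conv_lhs => rw [← List.take_append_drop b.length pvSep, ← hbtake]
      nth_rewrite 1 [hsplit] at hpre
      exact (List.prefix_append_right_inj b).mp hpre
    have hr2 : pvSep.drop b.length <+: pvSep :=
      (List.isPrefix_append_of_length (by simp)).mp hr
    have hreq : pvSep.drop b.length = pvSep.take (9 - b.length) := by
      have := List.prefix_iff_eq_take.mp hr2
      simpa [pvSep] using this
    have hdec : ∀ j < 9, 1 ≤ j → (pvSep.drop j = pvSep.take (9 - j)) → pvFx <:+: pvSep.take j := by
      decide
    have hj9 : b.length < 9 := by simpa [pvSep] using Nat.lt_of_not_le hlen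
    have hj1 : 1 ≤ b.length := List.length_pos_iff.mpr hb
    have : pvFx <:+: pvSep.take b.length := hdec b.length hj9 hj1 hreq
    rw [← hbtake] at this
    exact hu (this.trans hsuf.isInfix)

lemma head?_take (l : List Char) (n : Nat) (h : 1 ≤ n) : (l.take n).head? = l.head? := by
  cases l <;> cases n <;> simp_all

-- no pvSep-occurrence can start inside the marked item 'FIXHREF' ++ target
set_option maxRecDepth 8192 in
lemma h2 (xs v : List Char) (hT : ¬ pvFx <:+: pvTgt xs) :
    ∀ b, b ≠ [] → b <:+ pvFx ++ pvTgt xs → ¬ pvSep <+: b ++ pvSep ++ v := by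
  intro b hb hsuf hpre
  rw [List.append_assoc] at hpre
  obtain ⟨a, ha⟩ := hsuf
  by_cases hlen : pvSep.length ≤ b.length
  · -- a full sentinel starts inside b, hence FIXHREF sits at offset p ≥ 1 of pvFx ++ T
    have hsp : pvSep <+: b := (List.isPrefix_append_of_length hlen).mp hpre
    have hfxd : pvFx <+: b.drop 1 :=
      (by decide : pvFx <+: pvSep.drop 1).trans (hsp.drop 1)
    have hbd : b.drop 1 = (pvFx ++ pvTgt xs).drop (a.length + 1) := by
      rw [← ha, List.drop_length_add_append]
    rw [hbd] at hfxd
    set p := a.length + 1 with hp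
    by_cases hp7 : 7 ≤ p
    · -- the occurrence lies wholly inside T
      have hd : (pvFx ++ pvTgt xs).drop p = (pvTgt xs).drop (p - 7) := by
        conv_lhs => rw [show p = pvFx.length + (p - 7) by simp [pvFx]; omega]
        rw [List.drop_length_add_append]
      rw [hd] at hfxd
      exact hT (hfxd.isInfix.trans (List.drop_suffix _ _).isInfix)
    · -- the occurrence straddles the boundary, so T would have to start with a FIXHREF letter
      have hp1 : 1 ≤ p := by omega
      have hp6 : p ≤ 6 := by omega
      have hd : (pvFx ++ pvTgt xs).drop p = pvFx.drop p ++ pvTgt xs := by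
        rw [List.drop_append_of_le_length (by simp [pvFx]; omega)]
      rw [hd] at hfxd
      have htk : pvFx = pvFx.drop p ++ (pvTgt xs).take p := by
        have h7 : pvFx = (pvFx.drop p ++ pvTgt xs).take 7 := by
          have := List.prefix_iff_eq_take.mp hfxd
          simpa [pvFx] using this
        rw [List.take_append] at h7
        have hlen7 : (pvFx.drop p).length = 7 - p := by simp [pvFx]
        conv_lhs => rw [h7]
        rw [List.take_of_length_le (by rw [hlen7]; omega), hlen7,
          show 7 - (7 - p) = p by omega]
      have hTt : (pvTgt xs).take p = pvFx.drop (7 - p) := by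
        have := congrArg (List.drop (7 - p)) htk
        rw [List.drop_left' (by simp [pvFx])] at this
        exact this.symm
      have hhd : ((pvTgt xs).take p).head? = some '<' := by
        rw [head?_take _ _ hp1]
        simp [pvTgt]
      rw [hTt] at hhd
      have hdec : ∀ j < 7, ¬ ((pvFx.drop j).head? = some '<') := by decide
      exact hdec (7 - p) (by omega) hhd
  · -- b is a short prefix of the sentinel, but must end in '"'
    have hble : b.length ≤ pvSep.length := Nat.le_of_lt (Nat.lt_of_not_le hlen)
    have hbp : b <+: pvSep :=
      List.prefix_of_prefix_length_le (List.prefix_append b _) hpre hble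
    have hbtake : b = pvSep.take b.length := List.prefix_iff_eq_take.mp hbp
    have hlast2 : (pvFx ++ pvTgt xs).getLast? = some '"' := by
      rw [pvTgt, show pvFx ++ ("<graphic href=\"?".toList ++ xs ++ ['"']) =
        (pvFx ++ ("<graphic href=\"?".toList ++ xs)) ++ ['"'] by simp,
        List.getLast?_append_of_ne_nil _ (by simp)]
      rfl
    have hlast : b.getLast? = some '"' := by
      rw [← List.getLast?_append_of_ne_nil a hb, ha, hlast2]
    have hdec : ∀ j < 10, ¬ ((pvSep.take j).getLast? = some '"') := by decide
    exact hdec b.length (by simp [pvSep] at hble ⊢; omega) (hbtake ▸ hlast)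

lemma exists_first_decomp (T : List Char) :
    ∀ cs, T <:+: cs → ∃ u v, cs = u ++ T ++ v ∧ ∀ i < u.length, ¬ T <+: cs.drop i := by
  intro cs
  induction cs with
  | nil =>
    intro h
    rw [List.infix_nil] at h
    exact ⟨[], [], by simp [h], by simp⟩
  | cons c t ih =>
    intro h
    by_cases hp : T <+: c :: t
    · obtain ⟨w, hw⟩ := hp
      exact ⟨[], w, by simp [← hw], by simp⟩
    · obtain ⟨u, v, heq, hmin⟩ := ih ((List.infix_cons_iff.mp h).resolve_left hp)
      refine ⟨c :: u, v, by simp [heq], ?_⟩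
      intro i hi
      cases i with
      | zero => simpa using hp
      | succ j =>
        simp only [List.drop_succ_cons]
        exact hmin j (by simpa using Nat.lt_of_succ_lt_succ hi)

def loopA (lst : List String) : List (List Char) → Int → List Char
  | [], _ => []
  | it :: its, i =>
    if PySem.Chars.startswith it pvFx then pvG lst i ++ loopA lst its (i + 1)
    else it ++ loopA lst its i

def rebuild (lst : List String) : List (List Char) → Int → List Char
  | [], _ => []
  | p :: ps, i => pvG lst i ++ p ++ rebuild lst ps (i + 1)

def consB (lst : List String) (ls : List (List Char)) (i : Int) : List Char :=
  match ls with
  | [] => []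
  | p :: ps => p ++ rebuild lst ps i

lemma foldA (lst : List String) :
    ∀ items (acc : List Char) (i : Int),
      (items.foldl (fun (st : List Char × Int) item =>
        if PySem.Chars.startswith item pvFx then (st.1 ++ pvG lst st.2, st.2 + 1)
        else (st.1 ++ item, st.2)) (acc, i)).1 = acc ++ loopA lst items i := by
  intro items
  induction items with
  | nil => intro acc i; simp [loopA]
  | cons it its ih =>
    intro acc i
    rw [List.foldl_cons, loopA]
    by_cases hs : PySem.Chars.startswith it pvFx
    · simp only [hs, if_true, ih, List.append_assoc]
    · simp only [hs, if_false, Bool.false_eq_true, ih, List.append_assoc]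

lemma foldB (lst : List String) :
    ∀ rest (s : Int) (acc : List (List Char)),
      ((PySem.List.enumerate rest s).foldl
        (fun acc ip => acc ++ [pvG lst ip.1] ++ [ip.2]) acc).flatten
      = acc.flatten ++ rebuild lst rest s := by
  intro rest
  induction rest with
  | nil => intro s acc; simp [PySem.List.enumerate_nil, rebuild]
  | cons p ps ih =>
    intro s acc
    rw [PySem.List.enumerate_cons, List.foldl_cons, ih, rebuild]
    simp [List.append_assoc]

lemma joinNil (ps : List (List Char)) : PySem.Chars.join [] ps = ps.flatten := by
  unfold PySem.Chars.join List.intercalate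
  induction ps with
  | nil => rfl
  | cons p t ih => cases t <;> simp_all [List.intersperse]

lemma startswith_false_of_not_infix (u : List Char) (hu : ¬ pvFx <:+: u) :
    PySem.Chars.startswith u pvFx = false := by
  rw [PySem.Chars.startswith]
  cases hx : pvFx.isPrefixOf u
  · rfl
  · exact absurd ((List.isPrefixOf_iff_prefix.mp hx).isInfix) hu

lemma main_lemma (xs : List Char) (lst : List String) :
    ∀ n cs, cs.length ≤ n → ¬ pvFx <:+: cs → ∀ i : Int,
      loopA lst (scanSplit pvSep (scanRep (pvTgt xs) (pvSep ++ pvFx ++ pvTgt xs ++ pvSep) cs)) i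
        = consB lst (scanSplit (pvTgt xs) cs) i := by
  intro n
  induction n with
  | zero =>
    intro cs hl _ i
    have : cs = [] := List.length_eq_zero_iff.mp (Nat.le_zero.mp hl)
    subst this
    simp [scanRep, scanSplit, loopA, consB, rebuild,
      (by decide : PySem.Chars.startswith [] pvFx = false)]
  | succ n ih =>
    intro cs hl hfx i
    have hTne : pvTgt xs ≠ [] := by simp [pvTgt]
    by_cases hocc : pvTgt xs <:+: cs
    · obtain ⟨u, v, heq, hmin⟩ := exists_first_decomp _ cs hocc
      subst heq
      have hfxT : ¬ pvFx <:+: pvTgt xs := fun h => hfx (h.trans ⟨u, v, by simp⟩)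
      have hfxu : ¬ pvFx <:+: u := fun h => hfx (h.trans ⟨[], pvTgt xs ++ v, by simp⟩)
      have hfxv : ¬ pvFx <:+: v := fun h => hfx (h.trans ⟨u ++ pvTgt xs, [], by simp⟩)
      rw [scanRep_boundary _ _ hTne u v hmin]
      rw [show u ++ (pvSep ++ pvFx ++ pvTgt xs ++ pvSep)
            ++ scanRep (pvTgt xs) (pvSep ++ pvFx ++ pvTgt xs ++ pvSep) v
          = u ++ pvSep ++ ((pvFx ++ pvTgt xs) ++ pvSep
            ++ scanRep (pvTgt xs) (pvSep ++ pvFx ++ pvTgt xs ++ pvSep) v) by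
        simp [List.append_assoc]]
      rw [scanSplit_boundary pvSep (by decide) u _
        (occ_of_suffix_form _ _ _ (h1 u _ hfxu))]
      rw [scanSplit_boundary pvSep (by decide) (pvFx ++ pvTgt xs) _
        (occ_of_suffix_form _ _ _ (h2 xs _ hfxT))]
      rw [loopA, if_neg (by simp [startswith_false_of_not_infix u hfxu])]
      rw [loopA, if_pos (by
        rw [PySem.Chars.startswith]
        exact List.isPrefixOf_iff_prefix.mpr (List.prefix_append _ _))]
      rw [ih v (by
        have := congrArg List.length (rfl : u ++ pvTgt xs ++ v = u ++ pvTgt xs ++ v)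
        have h1 : 1 ≤ (pvTgt xs).length := List.length_pos_iff.mpr hTne
        simp only [List.length_append] at hl ⊢
        omega) hfxv (i + 1)]
      rw [scanSplit_boundary (pvTgt xs) hTne u v hmin]
      cases hsv : scanSplit (pvTgt xs) v with
      | nil => exact absurd hsv (scanSplit_ne_nil _ _)
      | cons p ps => simp [consB, rebuild, List.append_assoc]
    · have hsepocc : ¬ pvSep <:+: cs := fun h => hfx ((by decide : pvFx <:+: pvSep).trans h)
      rw [scanRep_no_occ _ _ _ hocc, scanSplit_no_occ pvSep cs hsepocc,
        scanSplit_no_occ (pvTgt xs) cs hocc]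
      rw [loopA, if_neg (by simp [startswith_false_of_not_infix cs hfx])]
      simp [loopA, consB, rebuild]

-- ===== VERDICT (by name: the statement is the Claim_ definition above) =====
theorem fix_href_spec : Claim_equal_fix_href := by
  unfold Claim_equal_fix_href
  intro content xml_name new_href_list _ hpre
  unfold Spec_fix_href
  obtain ⟨hfx, -⟩ := hpre
  have hfx' : ¬ pvFx <:+: content.toList := (PySem.Chars.isIn_eq_false_iff _ _).mp hfx
  have hTne : pvTgt xml_name.toList ≠ [] := by simp [pvTgt]
  simp only [fix_href, fix_href_alt]
  rw [replace_eq _ _ _ hTne, splitOn_eq _ _ (by decide : pvSep ≠ []),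
    splitOn_eq _ _ hTne, foldA,
    main_lemma xml_name.toList new_href_list content.toList.length content.toList le_rfl hfx' 0]
  cases hsp : scanSplit (pvTgt xml_name.toList) content.toList with
  | nil => exact absurd hsp (scanSplit_ne_nil _ _)
  | cons p rest =>
    simp only [joinNil, foldB, List.flatten_cons, List.flatten_nil, List.nil_append,
      List.append_nil, consB]
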